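-- pv_equiv track=rewrite | github.com/wkshum/Probability-Simulation | Fixed-length source coding.py | bits_to_number
-- ===== SOURCE A (Python) =====
-- from math import comb
--
-- def bits_to_number(c):
--     n = len(c)
--     k = sum(c)  # number of 1 in c
--     a = [i for i , m in enumerate(c) if m==1]  # locations of 1
--     s = sum([comb(m,i+1) for i,m in enumerate(a)])
--     for i in range(k):
--         s += comb(n,i)  # add binomial coefficient comb(n,i)
--     return s
-- ===== SOURCE B (Python) =====
-- def bits_to_number(c):
--     s = 0
--     t = 0                    # entries equal to 1 seen so far
--     row = [1]                # Pascal's triangle row for the current index i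
--     for x in c:
--         if x == 1:
--             s += row[t + 1] if t + 1 < len(row) else 0   # C(i, t+1)
--             t += 1
--         row = [1] + [p + q for p, q in zip(row, row[1:])] + [1]
--     k = sum(c)
--     if k > 0:
--         s += sum(row[:k])    # C(n,0)+...+C(n,k-1); entries beyond the row are zero
--     return s
-- ===== Notes on version B (the rewrite author's own statement) =====
-- stated objective: alternative
-- what changed: replaces all math.comb calls by a dynamic-programming scan that grows Pascal's triangle row by row while walking the list: the colex term C(i,t+1) is read off the current row when an entry equals 1, and the final sum of C(n,i) for i<k is a slice-sum of the last row
import Mathlib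
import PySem

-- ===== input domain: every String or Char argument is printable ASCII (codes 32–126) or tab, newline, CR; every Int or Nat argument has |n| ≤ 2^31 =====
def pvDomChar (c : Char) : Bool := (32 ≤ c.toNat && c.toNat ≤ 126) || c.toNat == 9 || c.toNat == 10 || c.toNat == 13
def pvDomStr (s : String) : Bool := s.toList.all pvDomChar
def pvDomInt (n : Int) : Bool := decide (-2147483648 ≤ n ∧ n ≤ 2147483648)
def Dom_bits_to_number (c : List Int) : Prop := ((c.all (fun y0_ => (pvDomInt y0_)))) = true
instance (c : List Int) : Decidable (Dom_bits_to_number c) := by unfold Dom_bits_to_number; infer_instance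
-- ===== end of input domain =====

-- B replaces every math.comb call by a dynamic-programming scan that grows Pascal's triangle
-- row by row while walking the list (additions only); same value on every input.

-- ===== PORT A =====
-- math.comb, as CPython computes it: 0 when k > n, else the exact running product
-- C(n,k) = prod_{j=1..k} (n-k+j)/j; exact here because every call site passes
-- nonnegative arguments (proved equal to Nat.choose in pyComb_eq_choose below)
def pyCombAux (n r : Nat) (j : Nat) (acc : Nat) : Nat :=
  if j < r then pyCombAux n r (j+1) (acc * (n - r + (j+1)) / (j+1)) else acc
  termination_by r - j

def pyComb (n k : Int) : Int :=
  if n.toNat < k.toNat then 0 else ((pyCombAux n.toNat k.toNat 0 1 : Nat) : Int)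

-- the 'for i in range(k)' loop, as a counter loop (Python's range is lazy)
def loopRangeA (n : Int) (s i k : Int) : Int :=
  if i < k then loopRangeA n (s + pyComb n i) (i+1) k else s
  termination_by (k - i).toNat
  decreasing_by omega

def bits_to_number (c : List Int) : Int :=
  let n : Int := (c.length : Int)
  let k : Int := c.sum
  let a : List Int := (PySem.List.enumerate c 0).filterMap
      (fun im => if im.2 = 1 then some im.1 else none)
  let s : Int := ((PySem.List.enumerate a 0).map (fun im => pyComb im.2 (im.1 + 1))).sum
  loopRangeA n s 0 k

-- ===== PORT B =====
-- [1] + [p+q for p,q in zip(row, row[1:])] + [1]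
def pascalStep (row : List Int) : List Int :=
  1 :: (List.zipWith (· + ·) row row.tail ++ [1])

def bitsAltStep (st : Int × Int × List Int) (x : Int) : Int × Int × List Int :=
  let s := st.1; let t := st.2.1; let row := st.2.2
  if x = 1 then
    (s + (if t + 1 < (row.length : Int) then PySem.List.pyGetD row (t + 1) 0 else 0),
     t + 1, pascalStep row)
  else (s, t, pascalStep row)

def bits_to_number_alt (c : List Int) : Int :=
  let st := c.foldl bitsAltStep (0, 0, [1])
  let k : Int := c.sum
  if k > 0 then st.1 + (PySem.List.slice st.2.2 none (some k)).sum else st.1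

-- ===== PRECONDITION & SPEC =====
def Spec_bits_to_number (c : List Int) (out : Int) : Prop := out = bits_to_number_alt c
instance (c : List Int) (out : Int) : Decidable (Spec_bits_to_number c out) := by unfold Spec_bits_to_number; infer_instance

-- ===== CLAIM (what is proved, stated in full; the proofs are below) =====
def Claim_equal_bits_to_number : Prop := ∀ (c : List Int), Dom_bits_to_number c → Spec_bits_to_number c (bits_to_number c)

-- ===== LEMMAS AND PROOFS =====

theorem pyCombAux_eq_choose (n r : Nat) (hr : r ≤ n) :
    ∀ (d j : Nat) (acc : Nat), r - j = d → j ≤ r → acc = (n - r + j).choose j →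
      pyCombAux n r j acc = n.choose r := by
  intro d
  induction d with
  | zero =>
    intro j acc hd hj hacc
    have hjr : j = r := by omega
    rw [pyCombAux, if_neg (by omega)]
    subst hjr
    rw [hacc, Nat.sub_add_cancel hr]
  | succ d ih =>
    intro j acc hd hj hacc
    rw [pyCombAux, if_pos (by omega)]
    apply ih (j+1) _ (by omega) (by omega)
    rw [hacc]
    have key : (n - r + j).choose j * (n - r + (j+1))
        = (n - r + (j+1)).choose (j+1) * (j+1) := by
      have h := Nat.add_one_mul_choose_eq (n - r + j) j
      have e : n - r + (j+1) = (n - r + j) + 1 := by omega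
      rw [e, Nat.mul_comm]
      exact h
    rw [key, Nat.mul_div_cancel _ (by omega)]

theorem pyComb_eq_choose (n k : Int) :
    pyComb n k = ((n.toNat.choose k.toNat : Nat) : Int) := by
  unfold pyComb
  by_cases h : n.toNat < k.toNat
  · rw [if_pos h, Nat.choose_eq_zero_of_lt h]
    simp
  · rw [if_neg h]
    rw [pyCombAux_eq_choose n.toNat k.toNat (by omega) (k.toNat - 0) 0 1 rfl (by omega) (by simp)]

theorem loopRangeA_eq (n k : Int) :
    ∀ (d : Nat) (i s : Int), (k - i).toNat = d →
      loopRangeA n s i k = s + ((PySem.List.pyRange i k 1).map (fun x => pyComb n x)).sum := by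
  intro d
  induction d with
  | zero =>
    intro i s hd
    rw [loopRangeA, if_neg (by omega), PySem.List.pyRange_one_eq_nil (by omega)]
    simp
  | succ d ih =>
    intro i s hd
    rw [loopRangeA, if_pos (by omega), PySem.List.pyRange_one_cons (by omega)]
    rw [ih (i+1) _ (by omega)]
    simp only [List.map_cons, List.sum_cons]
    ring

-- Pascal's triangle row n (proof-side model of B's `row`)
def pascalRow (n : Nat) : List Int := (List.range (n+1)).map (fun j => ((n.choose j : Nat) : Int))

-- positions of the ones, starting at index p (proof-side model of A's comprehension)
def onesA : List Int → Int → List Int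
  | [], _ => []
  | m :: r, p => if m = 1 then p :: onesA r (p + 1) else onesA r (p + 1)

-- A's first sum, with the enumeration of the ones list starting at j
def sumA (a : List Int) (j : Int) : Int :=
  ((PySem.List.enumerate a j).map (fun im => pyComb im.2 (im.1 + 1))).sum

-- B's accumulated colex contribution, scanning from index i with t ones already seen
def colexSum : List Int → Nat → Nat → Int
  | [], _, _ => 0
  | x :: r, i, t =>
    if x = 1 then (i.choose (t+1) : Int) + colexSum r (i+1) (t+1) else colexSum r (i+1) t

theorem filterMap_eq_onesA (c : List Int) (p : Int) :
    (PySem.List.enumerate c p).filterMap (fun im => if im.2 = 1 then some im.1 else none)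
      = onesA c p := by
  induction c generalizing p with
  | nil => simp [PySem.List.enumerate_nil, onesA]
  | cons m r ih =>
    simp only [PySem.List.enumerate_cons, List.filterMap_cons, onesA]
    split_ifs with h <;> simp [ih]

theorem sumA_cons (p : Int) (a : List Int) (j : Int) :
    sumA (p :: a) j = pyComb p (j + 1) + sumA a (j + 1) := by
  simp [sumA, PySem.List.enumerate_cons]

-- A's comprehension sum equals B's scan-side colex sum
theorem sumA_onesA (c : List Int) : ∀ (i t : Nat),
    sumA (onesA c (i : Int)) (t : Int) = colexSum c i t := by
  induction c with
  | nil => intro i t; simp [onesA, sumA, colexSum, PySem.List.enumerate_nil]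
  | cons x r ih =>
    intro i t
    by_cases hx : x = 1
    · subst hx
      simp only [onesA, colexSum, reduceIte]
      rw [sumA_cons]
      have h1 : ((i : Int) + 1) = ((i + 1 : Nat) : Int) := by push_cast; ring
      have h2 : ((t : Int) + 1) = ((t + 1 : Nat) : Int) := by push_cast; ring
      have hc : pyComb (i : Int) ((t : Int) + 1) = (i.choose (t+1) : Int) := by
        rw [pyComb_eq_choose]
        congr 2
      rw [hc, h1, h2, ih (i+1) (t+1)]
    · simp only [onesA, colexSum, if_neg hx]
      have h1 : ((i : Int) + 1) = ((i + 1 : Nat) : Int) := by push_cast; ring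
      rw [h1, ih (i+1) t]

theorem pascalRow_length (n : Nat) : (pascalRow n).length = n + 1 := by
  simp [pascalRow]

theorem pascalStep_row (n : Nat) : pascalStep (pascalRow n) = pascalRow (n+1) := by
  apply List.ext_getElem
  · simp [pascalStep, pascalRow, List.length_zipWith]
  · intro i h1 h2
    cases i with
    | zero => simp [pascalStep, pascalRow]
    | succ j =>
      have hlen : (List.zipWith (· + ·) (pascalRow n) (pascalRow n).tail).length = n := by
        simp [List.length_zipWith, pascalRow]
      simp only [pascalStep, List.getElem_cons_succ]
      by_cases hj : j < n
      · rw [List.getElem_append_left (by omega)]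
        rw [List.getElem_zipWith]
        have ha : (pascalRow n)[j]'(by rw [pascalRow_length]; omega) = (n.choose j : Int) := by
          simp [pascalRow]
        have hb : ((pascalRow n).tail)[j]'(by simp [pascalRow_length]; omega)
            = (n.choose (j+1) : Int) := by
          rw [List.getElem_tail]; simp [pascalRow]
        rw [ha, hb]
        have : (pascalRow (n+1))[j+1]'(by rw [pascalRow_length]; omega)
            = ((n+1).choose (j+1) : Int) := by simp [pascalRow]
        rw [this, Nat.choose_succ_succ]
        push_cast; ring
      · have hj' : j = n := by
          have := h2; rw [pascalRow_length] at this; omega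
        rw [List.getElem_append_right (by omega)]
        have h3 : (pascalRow (n+1))[j+1]'(by rw [pascalRow_length]; omega)
            = (((n+1).choose (j+1) : Nat) : Int) := by simp [pascalRow]
        rw [h3]
        simp only [List.getElem_singleton]
        rw [hj', Nat.choose_self]
        simp

theorem pascalRow_getD (n i : Nat) : (pascalRow n).getD i 0 = (n.choose i : Int) := by
  rcases lt_or_ge i (n+1) with h | h
  · rw [List.getD_eq_getElem _ _ (by rw [pascalRow_length]; omega)]
    simp [pascalRow]
  · rw [List.getD_eq_default _ _ (by rw [pascalRow_length]; omega)]
    rw [Nat.choose_eq_zero_of_lt (by omega)]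
    simp

-- the guarded row lookup in B is exactly C(n, t+1)
theorem row_lookup (n t : Nat) :
    (if (t : Int) + 1 < ((pascalRow n).length : Int)
       then PySem.List.pyGetD (pascalRow n) ((t : Int) + 1) 0 else 0)
      = (n.choose (t+1) : Int) := by
  have hc : ((t : Int) + 1) = ((t + 1 : Nat) : Int) := by push_cast; ring
  by_cases h : t + 1 < n + 1
  · rw [if_pos (by rw [pascalRow_length]; exact_mod_cast h)]
    rw [hc, PySem.List.pyGetD_natCast, pascalRow_getD]
  · rw [if_neg (by rw [pascalRow_length]; push_cast; omega)]
    rw [Nat.choose_eq_zero_of_lt (by omega)]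
    simp

-- loop invariant for B's scan: state = (accumulated sum, #ones, current Pascal row)
theorem phase1 (c : List Int) : ∀ (i t : Nat) (s : Int),
    c.foldl bitsAltStep (s, (t : Int), pascalRow i)
      = (s + colexSum c i t,
         ((t + c.countP (· = 1) : Nat) : Int),
         pascalRow (i + c.length)) := by
  induction c with
  | nil => intro i t s; simp [colexSum]
  | cons x r ih =>
    intro i t s
    rw [List.foldl_cons]
    by_cases hx : x = 1
    · subst hx
      have hstep : bitsAltStep (s, (t : Int), pascalRow i) 1
          = (s + (i.choose (t+1) : Int), (t : Int) + 1, pascalRow (i+1)) := by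
        simp only [bitsAltStep, row_lookup, pascalStep_row, reduceIte]
      rw [hstep]
      have hc : ((t : Int) + 1) = ((t + 1 : Nat) : Int) := by push_cast; ring
      rw [hc, ih (i+1) (t+1)]
      have hcnt : List.countP (fun y => decide (y = 1)) ((1 : Int) :: r)
          = List.countP (fun y => decide (y = 1)) r + 1 := by simp
      simp only [Prod.mk.injEq]
      refine ⟨?_, ?_, ?_⟩
      · simp only [colexSum, reduceIte]; ring
      · rw [hcnt]; push_cast; ring
      · rw [List.length_cons]; congr 1; omega
    · have hstep : bitsAltStep (s, (t : Int), pascalRow i) x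
          = (s, (t : Int), pascalRow (i+1)) := by
        simp only [bitsAltStep, if_neg hx, pascalStep_row]
      rw [hstep, ih (i+1) t]
      have hcnt : List.countP (fun y => decide (y = 1)) (x :: r)
          = List.countP (fun y => decide (y = 1)) r := by simp [hx]
      simp only [Prod.mk.injEq]
      refine ⟨by simp [colexSum, hx], by rw [hcnt], ?_⟩
      rw [List.length_cons]; congr 1; omega

-- A's final range(k) sum equals B's slice-sum of the last Pascal row
theorem tail_sum (n : Nat) (k : Int) :
    ((PySem.List.pyRange 0 k 1).map (fun i => pyComb (n : Int) i)).sum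
      = if k > 0 then (PySem.List.slice (pascalRow n) none (some k)).sum else 0 := by
  by_cases hk : k > 0
  · rw [if_pos hk, PySem.List.slice_to _ (by omega)]
    rw [PySem.List.pyRange_one]
    simp only [sub_zero, zero_add]
    -- both sides are sums over an initial segment of range
    have hcomb : ∀ j : Nat, pyComb (n : Int) (j : Int) = (n.choose j : Int) := by
      intro j; rw [pyComb_eq_choose]; simp
    rw [List.map_map]
    have hmap : (List.range k.toNat).map ((fun i => pyComb (n : Int) i) ∘ fun j : Nat => (j : Int))
        = (List.range k.toNat).map (fun j : Nat => (n.choose j : Int)) := by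
      apply List.map_congr_left; intro j _; exact hcomb j
    rw [hmap]
    unfold pascalRow
    rw [← List.map_take, List.take_range]
    rcases le_or_gt k.toNat (n+1) with h | h
    · rw [min_eq_left h]
    · rw [min_eq_right (by omega)]
      have hsplit : k.toNat = (n+1) + (k.toNat - (n+1)) := by omega
      rw [hsplit, List.range_add, List.map_append, List.sum_append]
      have hz : (List.map (fun j : Nat => ((n.choose j : Nat) : Int))
          (List.map (fun x => n + 1 + x) (List.range (k.toNat - (n + 1))))).sum = 0 := by
        rw [List.map_map]
        apply List.sum_eq_zero
        intro y hy
        simp only [List.mem_map, Function.comp] at hy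
        obtain ⟨x, _, rfl⟩ := hy
        rw [Nat.choose_eq_zero_of_lt (by omega)]
        simp
      rw [hz, add_zero]
  · rw [if_neg hk, PySem.List.pyRange_one_eq_nil (by omega)]
    simp

-- ===== VERDICT (by name: the statement is the Claim_ definition above) =====
theorem bits_to_number_spec : Claim_equal_bits_to_number := by
  intro c _
  show bits_to_number c = bits_to_number_alt c
  simp only [bits_to_number, bits_to_number_alt, filterMap_eq_onesA]
  have h0 : ((0 : Int), (0 : Int), ([1] : List Int))
      = ((0 : Int), ((0 : Nat) : Int), pascalRow 0) := by
    simp [pascalRow]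
  rw [h0, phase1 c 0 0 0]
  rw [loopRangeA_eq (c.length : Int) c.sum (c.sum - 0).toNat 0 _ rfl]
  have hS : ((PySem.List.enumerate (onesA c 0) 0).map (fun im => pyComb im.2 (im.1 + 1))).sum
      = sumA (onesA c 0) 0 := rfl
  rw [hS]
  have hA : sumA (onesA c 0) 0 = colexSum c 0 0 := by
    have := sumA_onesA c 0 0
    simpa using this
  rw [hA, tail_sum c.length c.sum]
  simp only [zero_add]
  by_cases hk : c.sum > 0
  · rw [if_pos hk, if_pos hk]
  · rw [if_neg hk, if_neg hk, add_zero]
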